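-- pv_equiv track=rewrite | github.com/Yosheto/Operator-EVM | Задание_для_допуска_massiv.py | poisk_podmassiva
-- ===== SOURCE A (Python) =====
-- def poisk_podmassiva(glav, pod):
--     """poisk podmassiva"""
--     len1 = len(glav)
--     len2 = len(pod)
--     if len2 == 0:
--         return -2
--     if len2 > len1:
--         return -1
--     for start in range(len1 - len2 + 1):
--         ok = True
--         for k in range(len2):
--             if glav[start + k] != pod[k]:
--                 ok = False
--                 break
--         if ok:
--             return start
--     return -1
-- ===== SOURCE B (Python) =====
-- def poisk_podmassiva(glav, pod):
--     """Rabin-Karp: rolling polynomial hash over windows, exact slice check on hash hits."""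
--     n = len(glav)
--     m = len(pod)
--     if m == 0:
--         return -2
--     if m > n:
--         return -1
--     MOD = 2305843009213693951  # 2**61 - 1
--     BASE = 1000003
--     hp = 0
--     for x in pod:
--         hp = (hp * BASE + x) % MOD
--     h = 0
--     for x in glav[:m]:
--         h = (h * BASE + x) % MOD
--     pw = 1
--     for _ in range(m - 1):
--         pw = pw * BASE % MOD
--     for i in range(n - m + 1):
--         if h == hp and glav[i:i + m] == pod:
--             return i
--         if i + m < n:
--             h = ((h - glav[i] * pw) * BASE + glav[i + m]) % MOD
--     return -1
-- ===== Notes on version B (the rewrite author's own statement) =====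
-- stated objective: alternative
-- what changed: Replaced the nested compare-at-every-offset scan with Rabin-Karp: a rolling polynomial hash is maintained across windows and the full slice comparison runs only on hash hits.
import Mathlib
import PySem

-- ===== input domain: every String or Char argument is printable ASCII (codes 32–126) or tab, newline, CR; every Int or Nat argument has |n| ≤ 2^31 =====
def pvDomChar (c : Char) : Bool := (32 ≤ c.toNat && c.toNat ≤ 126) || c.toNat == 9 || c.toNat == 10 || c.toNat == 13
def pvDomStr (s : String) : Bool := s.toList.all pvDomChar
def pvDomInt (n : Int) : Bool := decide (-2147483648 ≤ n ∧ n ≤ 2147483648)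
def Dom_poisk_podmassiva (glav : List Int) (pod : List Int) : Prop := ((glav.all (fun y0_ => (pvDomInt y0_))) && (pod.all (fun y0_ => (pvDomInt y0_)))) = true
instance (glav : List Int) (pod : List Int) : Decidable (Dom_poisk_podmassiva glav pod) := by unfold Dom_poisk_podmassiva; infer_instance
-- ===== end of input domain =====

-- B replaces A's compare-at-every-offset nested scan with Rabin-Karp (rolling hash,
-- exact slice comparison only on hash hits): a genuinely different algorithm of similar cost.

-- ===== PORT A =====
-- inner 'for k in range(len2)' loop with the ok/break flag: returns false on the first
-- mismatch, true if the whole window matches.  Indices start+k and k are always in range,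
-- so pyGetD is exact here (Python never raises in this loop).
def pvInnerA (glav pod : List Int) (start : Int) : List Int → Bool
  | [] => true
  | k :: ks =>
    if PySem.List.pyGetD glav (start + k) 0 ≠ PySem.List.pyGetD pod k 0 then false
    else pvInnerA glav pod start ks

-- outer 'for start in range(len1 - len2 + 1)' loop with the early 'return start'
def pvOuterA (glav pod : List Int) : List Int → Int
  | [] => -1
  | s :: ss =>
    if pvInnerA glav pod s (PySem.List.pyRange 0 (pod.length : Int) 1) then s
    else pvOuterA glav pod ss

def poisk_podmassiva (glav : List Int) (pod : List Int) : Int :=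
  let len1 : Int := glav.length
  let len2 : Int := pod.length
  if len2 = 0 then -2
  else if len2 > len1 then -1
  else pvOuterA glav pod (PySem.List.pyRange 0 (len1 - len2 + 1) 1)

-- ===== PORT B =====
def pvMOD : Int := 2305843009213693951  -- 2^61 - 1
def pvBASE : Int := 1000003

-- 'h = (h * BASE + x) % MOD'
def pvHashStep (h x : Int) : Int := PySem.Int.mod (h * pvBASE + x) pvMOD

-- the scanning loop of Source B: at index i, h is the rolling hash of glav[i:i+m];
-- on 'h == hp and glav[i:i+m] == pod' return i, otherwise roll the hash (only while i+m < n).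
def pvLoopB (glav pod : List Int) (hp pw : Int) : List Int → Int → Int
  | [], _ => -1
  | i :: is, h =>
    if h = hp ∧ PySem.List.slice glav (some i) (some (i + (pod.length : Int))) = pod then i
    else pvLoopB glav pod hp pw is
      (if i + (pod.length : Int) < (glav.length : Int) then
        PySem.Int.mod ((h - PySem.List.pyGetD glav i 0 * pw) * pvBASE
                        + PySem.List.pyGetD glav (i + (pod.length : Int)) 0) pvMOD
       else h)

def poisk_podmassiva_alt (glav : List Int) (pod : List Int) : Int :=
  let n : Int := glav.length
  let m : Int := pod.length
  if m = 0 then -2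
  else if m > n then -1
  else
    let hp := pod.foldl pvHashStep 0
    let h0 := (PySem.List.slice glav none (some m)).foldl pvHashStep 0
    let pw := (PySem.List.pyRange 0 (m - 1) 1).foldl
                (fun p _ => PySem.Int.mod (p * pvBASE) pvMOD) 1
    pvLoopB glav pod hp pw (PySem.List.pyRange 0 (n - m + 1) 1) h0

-- ===== PRECONDITION & SPEC =====
def Spec_poisk_podmassiva (glav : List Int) (pod : List Int) (out : Int) : Prop := out = poisk_podmassiva_alt glav pod
instance (glav : List Int) (pod : List Int) (out : Int) : Decidable (Spec_poisk_podmassiva glav pod out) := by unfold Spec_poisk_podmassiva; infer_instance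

-- ===== CLAIM (what is proved, stated in full; the proofs are below) =====
def Claim_equal_poisk_podmassiva : Prop := ∀ (glav : List Int) (pod : List Int), Dom_poisk_podmassiva glav pod → Spec_poisk_podmassiva glav pod (poisk_podmassiva glav pod)

-- ===== LEMMAS AND PROOFS =====

-- the exact (un-reduced) polynomial hash, the mathematical value behind the rolling hash
def pvPoly (h : Int) (l : List Int) : Int := l.foldl (fun a x => a * pvBASE + x) h

theorem pvPoly_cons (h x : Int) (l : List Int) : pvPoly h (x :: l) = pvPoly (h * pvBASE + x) l := rfl

theorem pvPoly_append_singleton (h x : Int) (l : List Int) :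
    pvPoly h (l ++ [x]) = pvPoly h l * pvBASE + x := by
  simp [pvPoly]

theorem pvPoly_split (l : List Int) : ∀ h : Int,
    pvPoly h l = h * pvBASE ^ l.length + pvPoly 0 l := by
  induction l with
  | nil => intro h; simp [pvPoly]
  | cons x xs ih =>
    intro h
    rw [pvPoly_cons, ih, pvPoly_cons, ih (0 * pvBASE + x), List.length_cons]
    ring

theorem pvPoly_modeq (l : List Int) : ∀ {a b : Int}, a ≡ b [ZMOD pvMOD] →
    pvPoly a l ≡ pvPoly b l [ZMOD pvMOD] := by
  induction l with
  | nil => intro a b h; exact h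
  | cons x xs ih =>
    intro a b h
    exact ih ((h.mul_right pvBASE).add_right x)

theorem pvMOD_pos : (0 : Int) < pvMOD := by norm_num [pvMOD]

theorem pvHash_eq_poly : ∀ (l : List Int), l ≠ [] → ∀ h : Int,
    l.foldl pvHashStep h = pvPoly h l % pvMOD := by
  intro l
  induction l with
  | nil => intro h; exact absurd rfl h
  | cons x xs ih =>
    intro _ h
    cases xs with
    | nil =>
      simp [pvHashStep, pvPoly, PySem.Int.mod_eq_emod_of_pos pvMOD_pos]
    | cons y ys =>
      have hne : (y :: ys) ≠ [] := by simp
      show (y :: ys).foldl pvHashStep (pvHashStep h x) = _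
      rw [ih hne (pvHashStep h x), pvPoly_cons]
      have : pvHashStep h x ≡ h * pvBASE + x [ZMOD pvMOD] := by
        unfold pvHashStep
        rw [PySem.Int.mod_eq_emod_of_pos pvMOD_pos]
        exact Int.emod_emod_of_dvd _ dvd_rfl
      exact pvPoly_modeq (y :: ys) this

theorem pvPw_modeq : ∀ (l : List Int) (p : Int) (e : Nat), p ≡ pvBASE ^ e [ZMOD pvMOD] →
    l.foldl (fun q _ => PySem.Int.mod (q * pvBASE) pvMOD) p ≡ pvBASE ^ (e + l.length) [ZMOD pvMOD] := by
  intro l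
  induction l with
  | nil => intro p e h; simpa using h
  | cons x xs ih =>
    intro p e h
    have hstep : PySem.Int.mod (p * pvBASE) pvMOD ≡ pvBASE ^ (e + 1) [ZMOD pvMOD] := by
      rw [PySem.Int.mod_eq_emod_of_pos pvMOD_pos]
      calc (p * pvBASE % pvMOD) ≡ p * pvBASE [ZMOD pvMOD] := Int.emod_emod_of_dvd _ dvd_rfl
        _ ≡ pvBASE ^ e * pvBASE [ZMOD pvMOD] := h.mul_right pvBASE
        _ = pvBASE ^ (e + 1) := by ring
    have := ih _ (e + 1) hstep
    simpa [Nat.add_assoc, Nat.add_comm 1 xs.length] using this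

-- rolling the hash one position: from the hash of glav[i:i+m] to the hash of glav[i+1:i+1+m]
theorem pvRoll (glav : List Int) (m i : Nat) (hm : 1 ≤ m) (hin : i + m < glav.length)
    (h pw : Int) (hh : h = pvPoly 0 ((glav.drop i).take m) % pvMOD)
    (hpw : pw ≡ pvBASE ^ (m - 1) [ZMOD pvMOD]) :
    ((h - glav[i]'(by omega) * pw) * pvBASE + glav[i + m]'hin) % pvMOD
      = pvPoly 0 ((glav.drop (i + 1)).take m) % pvMOD := by
  obtain ⟨m', rfl⟩ : ∃ m', m = m' + 1 := ⟨m - 1, by omega⟩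
  have hT : (glav.drop i).take (m' + 1) = glav[i]'(by omega) :: (glav.drop (i + 1)).take m' := by
    rw [List.drop_eq_getElem_cons (by omega), List.take_succ_cons]
  have hlen : ((glav.drop (i + 1)).take m').length = m' := by
    rw [List.length_take, List.length_drop]; omega
  have hW' : (glav.drop (i + 1)).take (m' + 1)
      = (glav.drop (i + 1)).take m' ++ [glav[i + (m' + 1)]'hin] := by
    rw [List.take_add_one]
    congr 1
    have hm' : m' < (glav.drop (i + 1)).length := by rw [List.length_drop]; omega
    have hidx : glav[i + (m' + 1)]'hin = glav[i + 1 + m']'(by omega) :=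
      getElem_congr rfl (by omega) (by omega)
    rw [List.getElem?_eq_getElem hm', List.getElem_drop, hidx]
    rfl
  have hpolyW : pvPoly 0 ((glav.drop i).take (m' + 1))
      = glav[i]'(by omega) * pvBASE ^ m' + pvPoly 0 ((glav.drop (i + 1)).take m') := by
    rw [hT, pvPoly_cons, pvPoly_split, hlen]
    ring
  have hpolyW' : pvPoly 0 ((glav.drop (i + 1)).take (m' + 1))
      = pvPoly 0 ((glav.drop (i + 1)).take m') * pvBASE + glav[i + (m' + 1)]'hin := by
    rw [hW', pvPoly_append_singleton]
  have hmod : ((h - glav[i]'(by omega) * pw) * pvBASE + glav[i + (m' + 1)]'hin)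
      ≡ pvPoly 0 ((glav.drop (i + 1)).take (m' + 1)) [ZMOD pvMOD] := by
    have h1 : h ≡ pvPoly 0 ((glav.drop i).take (m' + 1)) [ZMOD pvMOD] := by
      rw [hh]; exact Int.emod_emod_of_dvd _ dvd_rfl
    have h2 : glav[i]'(by omega) * pw ≡ glav[i]'(by omega) * pvBASE ^ m' [ZMOD pvMOD] := by
      have : pw ≡ pvBASE ^ m' [ZMOD pvMOD] := by simpa using hpw
      exact this.mul_left _
    calc (h - glav[i]'(by omega) * pw) * pvBASE + glav[i + (m' + 1)]'hin
        ≡ (pvPoly 0 ((glav.drop i).take (m' + 1)) - glav[i]'(by omega) * pvBASE ^ m') * pvBASE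
            + glav[i + (m' + 1)]'hin [ZMOD pvMOD] := ((h1.sub h2).mul_right _).add_right _
      _ = pvPoly 0 ((glav.drop (i + 1)).take (m' + 1)) := by
            rw [hpolyW, hpolyW']; ring
  exact hmod

-- A's inner loop tests exactly 'the window equals pod'
theorem pvInnerA_iff (glav pod : List Int) (i : Nat) (hle : i + pod.length ≤ glav.length) :
    ∀ (d k : Nat), d = pod.length - k → k ≤ pod.length →
    (pvInnerA glav pod (i : Int) (PySem.List.pyRange (k : Int) (pod.length : Int) 1) = true
      ↔ (glav.drop (i + k)).take (pod.length - k) = pod.drop k) := by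
  intro d
  induction d with
  | zero =>
    intro k hd hk
    have hkl : k = pod.length := by omega
    subst hkl
    rw [PySem.List.pyRange_one_eq_nil le_rfl]
    simp [pvInnerA, List.drop_of_length_le (le_refl pod.length)]
  | succ d ih =>
    intro k hd hk
    have hklt : k < pod.length := by omega
    rw [PySem.List.pyRange_one_cons (by exact_mod_cast hklt)]
    have hcast : ((k : Int) + 1) = ((k + 1 : Nat) : Int) := by push_cast; ring
    have hgb : i + k < glav.length := by omega
    have hga : PySem.List.pyGetD glav ((i : Int) + (k : Int)) 0 = glav[i + k]'hgb := by
      rw [show ((i : Int) + (k : Int)) = ((i + k : Nat) : Int) by push_cast; ring,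
        PySem.List.pyGetD_natCast, List.getD_eq_getElem _ _ hgb]
    have hgp : PySem.List.pyGetD pod (k : Int) 0 = pod[k]'hklt := by
      rw [PySem.List.pyGetD_natCast, List.getD_eq_getElem _ _ hklt]
    have hrhs : ((glav.drop (i + k)).take (pod.length - k) = pod.drop k)
        ↔ (glav[i + k]'hgb = pod[k]'hklt
            ∧ (glav.drop (i + (k + 1))).take (pod.length - (k + 1)) = pod.drop (k + 1)) := by
      rw [List.drop_eq_getElem_cons hgb, List.drop_eq_getElem_cons hklt,
        show pod.length - k = (pod.length - (k + 1)) + 1 by omega, List.take_succ_cons,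
        show i + k + 1 = i + (k + 1) by omega]
      exact List.cons_eq_cons
    rw [hrhs]
    show (if PySem.List.pyGetD glav ((i:Int) + (k:Int)) 0 ≠ PySem.List.pyGetD pod (k:Int) 0 then false
          else pvInnerA glav pod (i : Int) (PySem.List.pyRange ((k:Int) + 1) (pod.length : Int) 1)) = true ↔ _
    rw [hga, hgp, hcast]
    by_cases heq : glav[i + k]'hgb = pod[k]'hklt
    · simp only [heq, ne_eq, not_true_eq_false, ite_false]
      rw [ih (k + 1) (by omega) (by omega)]
      simp
    · simp [heq]

-- the two scanning loops agree, given the rolling-hash invariant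
theorem pvMaster (glav pod : List Int) (hp pw : Int)
    (hpod : pod ≠ [])
    (hhp : hp = pvPoly 0 pod % pvMOD)
    (hpw : pw ≡ pvBASE ^ (pod.length - 1) [ZMOD pvMOD]) :
    ∀ (cnt i : Nat) (h : Int),
    (i : Int) + (cnt : Int) = (glav.length : Int) - (pod.length : Int) + 1 →
    h = pvPoly 0 ((glav.drop i).take pod.length) % pvMOD →
    pvOuterA glav pod (PySem.List.pyRange (i : Int) ((glav.length : Int) - (pod.length : Int) + 1) 1)
      = pvLoopB glav pod hp pw
          (PySem.List.pyRange (i : Int) ((glav.length : Int) - (pod.length : Int) + 1) 1) h := by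
  intro cnt
  induction cnt with
  | zero =>
    intro i h hi _
    rw [show (glav.length : Int) - (pod.length : Int) + 1 = (i : Int) by push_cast at hi ⊢; omega,
      PySem.List.pyRange_one_eq_nil le_rfl]
    rfl
  | succ cnt ih =>
    intro i h hi hinv
    have hm1 : 1 ≤ pod.length := List.length_pos_of_ne_nil hpod
    have hile : i + pod.length ≤ glav.length := by push_cast at hi; omega
    rw [PySem.List.pyRange_one_cons (by push_cast at hi ⊢; omega)]
    simp only [pvOuterA, pvLoopB]
    have hA : (pvInnerA glav pod (i : Int) (PySem.List.pyRange 0 (pod.length : Int) 1) = true)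
        ↔ (glav.drop i).take pod.length = pod := by
      have := pvInnerA_iff glav pod i hile pod.length 0 (by omega) (by omega)
      simpa using this
    have hB : PySem.List.slice glav (some (i : Int)) (some ((i : Int) + (pod.length : Int))) = pod
        ↔ (glav.drop i).take pod.length = pod := by
      rw [PySem.List.slice_natCast_add]
    by_cases hmatch : (glav.drop i).take pod.length = pod
    · have hhp : h = hp := by rw [hinv, hmatch, hhp]
      rw [if_pos (hA.mpr hmatch), if_pos ⟨hhp, hB.mpr hmatch⟩]
    · rw [if_neg (fun hc => hmatch (hA.mp hc)), if_neg (fun hc => hmatch (hB.mp hc.2))]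
      rw [show (i : Int) + 1 = ((i + 1 : Nat) : Int) by push_cast; ring]
      cases cnt with
      | zero =>
        rw [show (glav.length : Int) - (pod.length : Int) + 1 = ((i + 1 : Nat) : Int) by
            push_cast at hi ⊢; omega,
          PySem.List.pyRange_one_eq_nil le_rfl]
        rfl
      | succ c =>
        have hlt : i + pod.length < glav.length := by push_cast at hi; omega
        have hiflt : (i : Int) + (pod.length : Int) < (glav.length : Int) := by exact_mod_cast hlt
        rw [if_pos hiflt]
        apply ih (i + 1) _ (by push_cast at hi ⊢; omega)
        have hga : PySem.List.pyGetD glav (i : Int) 0 = glav[i]'(by omega) := by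
          rw [PySem.List.pyGetD_natCast, List.getD_eq_getElem _ _ (by omega)]
        have hga' : PySem.List.pyGetD glav ((i : Int) + (pod.length : Int)) 0
            = glav[i + pod.length]'hlt := by
          rw [show (i : Int) + (pod.length : Int) = ((i + pod.length : Nat) : Int) by push_cast; ring,
            PySem.List.pyGetD_natCast, List.getD_eq_getElem _ _ hlt]
        rw [hga, hga', PySem.Int.mod_eq_emod_of_pos pvMOD_pos]
        exact pvRoll glav pod.length i hm1 hlt h pw hinv hpw

-- ===== VERDICT (by name: the statement is the Claim_ definition above) =====
theorem poisk_podmassiva_spec : Claim_equal_poisk_podmassiva := by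
  intro glav pod _
  unfold Spec_poisk_podmassiva
  by_cases hm0 : pod = []
  · simp [poisk_podmassiva, poisk_podmassiva_alt, hm0]
  · have hm1 : 1 ≤ pod.length := List.length_pos_of_ne_nil hm0
    have hm0' : ¬ ((pod.length : Int) = 0) := by
      intro hc
      exact hm0 (List.length_eq_zero_iff.mp (by exact_mod_cast hc))
    by_cases hgt : (pod.length : Int) > (glav.length : Int)
    · simp [poisk_podmassiva, poisk_podmassiva_alt, hgt]
    · have hmn : pod.length ≤ glav.length := by exact_mod_cast not_lt.mp hgt
      simp only [poisk_podmassiva, poisk_podmassiva_alt, if_neg hm0', if_neg hgt]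
      have hhp : pod.foldl pvHashStep 0 = pvPoly 0 pod % pvMOD := pvHash_eq_poly pod hm0 0
      have htake : glav.take pod.length ≠ [] := by
        apply List.ne_nil_of_length_pos
        rw [List.length_take]
        omega
      have hinv : (PySem.List.slice glav none (some (pod.length : Int))).foldl pvHashStep 0
          = pvPoly 0 ((glav.drop 0).take pod.length) % pvMOD := by
        rw [PySem.List.slice_to_natCast, List.drop_zero]
        exact pvHash_eq_poly _ htake 0
      have hpw : (PySem.List.pyRange 0 ((pod.length : Int) - 1) 1).foldl
            (fun p _ => PySem.Int.mod (p * pvBASE) pvMOD) 1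
          ≡ pvBASE ^ (pod.length - 1) [ZMOD pvMOD] := by
        have := pvPw_modeq (PySem.List.pyRange 0 ((pod.length : Int) - 1) 1) 1 0
          (by simp)
        rw [PySem.List.length_pyRange_one] at this
        simpa [show (((pod.length : Int) - 1) - 0).toNat = pod.length - 1 by omega] using this
      have := pvMaster glav pod (pvPoly 0 pod % pvMOD) _ hm0 rfl hpw
        (glav.length - pod.length + 1) 0
        ((PySem.List.slice glav none (some (pod.length : Int))).foldl pvHashStep 0)
        (by push_cast; omega) hinv
      rw [hhp]
      simpa using this
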